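-- pv_equiv track=rewrite | github.com/Keshav12kai/EXPERIMENT | prop_firm_scanner.py | signals_double_inside_bar
-- ===== SOURCE A (Python) =====
-- def signals_double_inside_bar(candles):
--     """Double inside bar — two consecutive inside bars then breakout."""
--     out = [None] * len(candles)
--     for i in range(3, len(candles)):
--         c3 = candles[i-3]  # container
--         c2 = candles[i-2]  # first inside
--         c1 = candles[i-1]  # second inside
--         c0 = candles[i]    # breakout
--
--         ib1 = c2["h"] <= c3["h"] and c2["l"] >= c3["l"]
--         ib2 = c1["h"] <= c2["h"] and c1["l"] >= c2["l"]
--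
--         if ib1 and ib2:
--             if c0["c"] > c3["h"]:
--                 out[i] = "LONG"
--             elif c0["c"] < c3["l"]:
--                 out[i] = "SHORT"
--     return out
-- ===== SOURCE B (Python) =====
-- def signals_double_inside_bar(candles):
--     """Double inside bar — two consecutive inside bars then breakout.
--
--     Re-implementation: a single pass maintaining a running streak counter of
--     consecutive inside bars, instead of recomputing both inside-bar tests
--     against three back-indexed candles in every window."""
--     out = [None] * len(candles)
--     if len(candles) < 4:
--         return out
--     streak = 0  # consecutive inside bars ending at bar i-1
--     for i in range(1, len(candles)):
--         if i >= 3 and streak >= 2: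
--             c = candles[i]["c"]
--             if c > candles[i - 3]["h"]:
--                 out[i] = "LONG"
--             elif c < candles[i - 3]["l"]:
--                 out[i] = "SHORT"
--         prev, cur = candles[i - 1], candles[i]
--         streak = streak + 1 if (cur["h"] <= prev["h"] and cur["l"] >= prev["l"]) else 0
--     return out
-- ===== Notes on version B (the rewrite author's own statement) =====
-- stated objective: alternative
-- what changed: B replaces A's per-window recomputation of the two inside-bar tests against back-indexed candles with a run-length accumulator: one pass maintains a streak counter of consecutive inside bars and fires a signal when the streak ending at the previous bar is at least 2.
import Mathlib
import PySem

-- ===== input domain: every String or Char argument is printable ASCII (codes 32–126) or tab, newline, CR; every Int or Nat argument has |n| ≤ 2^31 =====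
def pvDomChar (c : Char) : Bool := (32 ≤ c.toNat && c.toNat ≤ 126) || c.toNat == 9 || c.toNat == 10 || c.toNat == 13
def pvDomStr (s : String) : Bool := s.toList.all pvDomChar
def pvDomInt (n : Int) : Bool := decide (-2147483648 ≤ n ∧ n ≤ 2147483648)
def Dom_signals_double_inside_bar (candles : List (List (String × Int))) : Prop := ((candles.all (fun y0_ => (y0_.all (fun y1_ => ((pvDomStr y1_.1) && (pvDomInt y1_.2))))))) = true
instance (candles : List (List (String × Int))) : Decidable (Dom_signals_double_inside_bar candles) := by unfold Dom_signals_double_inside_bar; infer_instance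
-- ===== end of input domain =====

-- One honest line: B maintains a running streak counter of consecutive inside bars in one pass,
-- instead of A's recomputation of both inside-bar tests against back-indexed candles per window.

-- shared lookup helper: candle["k"] with a default (Pre_ guarantees the key exists where Python reads it)
def pvKey (c : List (String × Int)) (k : String) : Int :=
  (PySem.Dict.ofList c).getD k 0

-- ===== PORT A =====
def signals_double_inside_bar (candles : List (List (String × Int))) : List (Option String) :=
  (PySem.List.pyRange 3 candles.length 1).foldl
    (fun out i =>
      let c3 := PySem.List.pyGetD candles (i - 3) []
      let c2 := PySem.List.pyGetD candles (i - 2) []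
      let c1 := PySem.List.pyGetD candles (i - 1) []
      let c0 := PySem.List.pyGetD candles i []
      let ib1 := decide (pvKey c2 "h" ≤ pvKey c3 "h") && decide (pvKey c2 "l" ≥ pvKey c3 "l")
      let ib2 := decide (pvKey c1 "h" ≤ pvKey c2 "h") && decide (pvKey c1 "l" ≥ pvKey c2 "l")
      if ib1 && ib2 then
        if pvKey c0 "c" > pvKey c3 "h" then out.set i.toNat (some "LONG")
        else if pvKey c0 "c" < pvKey c3 "l" then out.set i.toNat (some "SHORT")
        else out
      else out)
    (List.replicate candles.length none)

-- ===== PORT B =====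
-- step of B's single pass: state = (out, streak of consecutive inside bars ending at bar i-1);
-- first the possible signal write using the OLD streak, then the streak update, as in Source B
def pvBStep (candles : List (List (String × Int)))
    (st : List (Option String) × Int) (i : Int) : List (Option String) × Int :=
  ( if 3 ≤ i ∧ 2 ≤ st.2 then
      if pvKey (PySem.List.pyGetD candles i []) "c" > pvKey (PySem.List.pyGetD candles (i - 3) []) "h" then
        st.1.set i.toNat (some "LONG")
      else if pvKey (PySem.List.pyGetD candles i []) "c" < pvKey (PySem.List.pyGetD candles (i - 3) []) "l" then
        st.1.set i.toNat (some "SHORT")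
      else st.1
    else st.1,
    if decide (pvKey (PySem.List.pyGetD candles i []) "h" ≤ pvKey (PySem.List.pyGetD candles (i - 1) []) "h") &&
       decide (pvKey (PySem.List.pyGetD candles i []) "l" ≥ pvKey (PySem.List.pyGetD candles (i - 1) []) "l")
    then st.2 + 1 else 0 )

def signals_double_inside_bar_alt (candles : List (List (String × Int))) : List (Option String) :=
  let n := candles.length
  let out : List (Option String) := List.replicate n none
  if n < 4 then out
  else ((PySem.List.pyRange 1 (n : Int) 1).foldl (pvBStep candles) (out, 0)).1

-- ===== PRECONDITION & SPEC =====
-- Pre_ excludes candle lists of length ≥ 4 in which some candle lacks one of the keys "h"/"l"/"c":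
-- there Python A raises KeyError on most such inputs, and where A still returns its value depends on
-- which lookups the short-circuit evaluation happened to skip (B raises KeyError on those inputs).
-- This is narrower than A's exact return set (see cites in claim.json).
def Pre_signals_double_inside_bar (candles : List (List (String × Int))) : Prop :=
  candles.length < 4 ∨
    ∀ c ∈ candles, (PySem.Dict.ofList c).contains "h" = true ∧
                   (PySem.Dict.ofList c).contains "l" = true ∧
                   (PySem.Dict.ofList c).contains "c" = true
instance (candles : List (List (String × Int))) : Decidable (Pre_signals_double_inside_bar candles) := by
  unfold Pre_signals_double_inside_bar; infer_instance

def pvWitness_signals_double_inside_bar : (List (List (String × Int))) :=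
  [[("h", 5), ("l", 1), ("c", 3)], [("h", 4), ("l", 2), ("c", 3)],
   [("h", 4), ("l", 2), ("c", 3)], [("h", 4), ("l", 2), ("c", 6)]]

def Spec_signals_double_inside_bar (candles : List (List (String × Int))) (out : List (Option String)) : Prop := out = signals_double_inside_bar_alt candles
instance (candles : List (List (String × Int))) (out : List (Option String)) : Decidable (Spec_signals_double_inside_bar candles out) := by unfold Spec_signals_double_inside_bar; infer_instance

-- ===== CLAIM (what is proved, stated in full; the proofs are below) =====
def Claim_equal_signals_double_inside_bar : Prop := ∀ (candles : List (List (String × Int))), Dom_signals_double_inside_bar candles → Pre_signals_double_inside_bar candles → Spec_signals_double_inside_bar candles (signals_double_inside_bar candles)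

-- ===== LEMMAS AND PROOFS =====

-- for j ≥ 1: bar j is an inside bar of bar j-1
def pvIns (candles : List (List (String × Int))) (j : Nat) : Bool :=
  decide (pvKey (candles.getD j []) "h" ≤ pvKey (candles.getD (j - 1) []) "h") &&
  decide (pvKey (candles.getD j []) "l" ≥ pvKey (candles.getD (j - 1) []) "l")

-- run length of consecutive inside bars ending at bar j
def pvRun (candles : List (List (String × Int))) : Nat → Int
  | 0 => 0
  | j + 1 => if pvIns candles (j + 1) then pvRun candles j + 1 else 0

lemma pvRun_succ (candles : List (List (String × Int))) (j : Nat) :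
    pvRun candles (j + 1) = if pvIns candles (j + 1) then pvRun candles j + 1 else 0 := rfl

lemma pvRun_nonneg (candles : List (List (String × Int))) (j : Nat) : 0 ≤ pvRun candles j := by
  induction j with
  | zero => simp [pvRun]
  | succ j ih => rw [pvRun_succ]; split <;> omega

-- pvRun j ≥ 2 iff the last two bars are both inside bars
lemma pvRun_ge_two (candles : List (List (String × Int))) (j : Nat) (hj : 2 ≤ j) :
    (2 ≤ pvRun candles j) ↔ (pvIns candles j = true ∧ pvIns candles (j - 1) = true) := by
  obtain ⟨k, rfl⟩ : ∃ k, j = k + 2 := ⟨j - 2, by omega⟩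
  have h1 := pvRun_nonneg candles k
  constructor
  · intro h
    rw [pvRun_succ] at h
    split at h
    · next ha =>
      rw [pvRun_succ] at h
      split at h
      · next hb => exact ⟨ha, hb⟩
      · omega
    · omega
  · rintro ⟨ha, hb⟩
    rw [pvRun_succ, if_pos ha, pvRun_succ, if_pos (show pvIns candles (k+1) = true by simpa using hb)]
    omega

lemma pv_getD (candles : List (List (String × Int))) (i : Int)
    (h0 : 0 ≤ i) (hn : i < (candles.length : Int)) :
    PySem.List.pyGetD candles i [] = candles.getD i.toNat [] := by
  rw [PySem.List.pyGetD_eq_getElem candles [] h0 hn]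
  rw [List.getD_eq_getElem?_getD, List.getElem?_eq_getElem (show i.toNat < candles.length by omega)]
  simp

-- B's streak update at index i (1 ≤ i < n) turns pvRun (i-1) into pvRun i
lemma pv_streak_step (candles : List (List (String × Int))) (i : Int)
    (h1 : 1 ≤ i) (hn : i < (candles.length : Int)) (out : List (Option String)) :
    (pvBStep candles (out, pvRun candles (i - 1).toNat) i).2 = pvRun candles i.toNat := by
  have e : i.toNat = (i - 1).toNat + 1 := by omega
  unfold pvBStep
  simp only
  rw [pv_getD candles i (by omega) hn, pv_getD candles (i - 1) (by omega) (by omega), e,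
      pvRun_succ]
  simp only [pvIns, Nat.add_sub_cancel]

-- A's step function, let-free (definitionally equal to the fold body of the A port)
def pvAStep (candles : List (List (String × Int)))
    (out : List (Option String)) (i : Int) : List (Option String) :=
  if (decide (pvKey (PySem.List.pyGetD candles (i - 2) []) "h" ≤ pvKey (PySem.List.pyGetD candles (i - 3) []) "h") &&
      decide (pvKey (PySem.List.pyGetD candles (i - 2) []) "l" ≥ pvKey (PySem.List.pyGetD candles (i - 3) []) "l")) &&
     (decide (pvKey (PySem.List.pyGetD candles (i - 1) []) "h" ≤ pvKey (PySem.List.pyGetD candles (i - 2) []) "h") &&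
      decide (pvKey (PySem.List.pyGetD candles (i - 1) []) "l" ≥ pvKey (PySem.List.pyGetD candles (i - 2) []) "l")) then
    if pvKey (PySem.List.pyGetD candles i []) "c" > pvKey (PySem.List.pyGetD candles (i - 3) []) "h" then
      out.set i.toNat (some "LONG")
    else if pvKey (PySem.List.pyGetD candles i []) "c" < pvKey (PySem.List.pyGetD candles (i - 3) []) "l" then
      out.set i.toNat (some "SHORT")
    else out
  else out

-- at 3 ≤ i < n, with streak = pvRun (i-1), B's out-update coincides with A's step
lemma pv_out_step (candles : List (List (String × Int))) (i : Int)
    (h3 : 3 ≤ i) (hn : i < (candles.length : Int)) (out : List (Option String)) :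
    (pvBStep candles (out, pvRun candles (i - 1).toNat) i).1 = pvAStep candles out i := by
  unfold pvBStep pvAStep
  simp only
  have hcond : (3 ≤ i ∧ 2 ≤ pvRun candles (i - 1).toNat) ↔
      ((decide (pvKey (PySem.List.pyGetD candles (i-2) []) "h" ≤ pvKey (PySem.List.pyGetD candles (i-3) []) "h") &&
        decide (pvKey (PySem.List.pyGetD candles (i-2) []) "l" ≥ pvKey (PySem.List.pyGetD candles (i-3) []) "l")) &&
       (decide (pvKey (PySem.List.pyGetD candles (i-1) []) "h" ≤ pvKey (PySem.List.pyGetD candles (i-2) []) "h") &&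
        decide (pvKey (PySem.List.pyGetD candles (i-1) []) "l" ≥ pvKey (PySem.List.pyGetD candles (i-2) []) "l"))) = true := by
    rw [pv_getD candles (i-3) (by omega) (by omega), pv_getD candles (i-2) (by omega) (by omega),
        pv_getD candles (i-1) (by omega) (by omega)]
    have hr := pvRun_ge_two candles (i - 1).toNat (by omega)
    have e1 : (i - 1).toNat - 1 = (i - 2).toNat := by omega
    have e2 : (i - 2).toNat - 1 = (i - 3).toNat := by omega
    simp only [pvIns, e1, e2] at hr
    constructor
    · rintro ⟨-, h2⟩
      have h := hr.mp h2
      simp only [Bool.and_eq_true] at h ⊢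
      exact ⟨h.2, h.1⟩
    · intro h
      refine ⟨h3, hr.mpr ?_⟩
      simp only [Bool.and_eq_true] at h ⊢
      exact ⟨h.2, h.1⟩
  by_cases hc : 3 ≤ i ∧ 2 ≤ pvRun candles (i - 1).toNat
  · rw [if_pos hc, if_pos (hcond.mp hc)]
  · rw [if_neg hc, if_neg (by intro h; exact hc (hcond.mpr h))]

-- main fold correspondence, from any start index 3 ≤ i ≤ n with the correct streak
lemma pv_fold (candles : List (List (String × Int))) :
    ∀ (k : Nat) (i : Int), 3 ≤ i → i + k = (candles.length : Int) →
    ∀ out, ((PySem.List.pyRange i candles.length 1).foldl (pvBStep candles)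
              (out, pvRun candles (i - 1).toNat)).1
         = (PySem.List.pyRange i candles.length 1).foldl (pvAStep candles) out := by
  intro k
  induction k with
  | zero =>
    intro i h3 hik out
    rw [PySem.List.pyRange_one_eq_nil (by omega)]
    simp
  | succ k ih =>
    intro i h3 hik out
    have hlt : i < (candles.length : Int) := by omega
    rw [PySem.List.pyRange_one_cons hlt]
    simp only [List.foldl_cons]
    have hstep : pvBStep candles (out, pvRun candles (i - 1).toNat) i
        = (pvAStep candles out i, pvRun candles i.toNat) := by
      have h1 := pv_out_step candles i h3 hlt out
      have h2 := pv_streak_step candles i (by omega) hlt out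
      exact Prod.ext_iff.mpr ⟨h1, h2⟩
    rw [hstep]
    have e : (i + 1 - 1).toNat = i.toNat := by omega
    have := ih (i + 1) (by omega) (by omega) (pvAStep candles out i)
    rw [e] at this
    exact this

-- at i < 3 the signal branch cannot fire: the step only advances the streak
lemma pv_small_step (candles : List (List (String × Int))) (i : Int)
    (hi1 : 1 ≤ i) (hi3 : i < 3) (hn : i < (candles.length : Int))
    (out : List (Option String)) (s : Int) (hs : s = pvRun candles (i - 1).toNat) :
    pvBStep candles (out, s) i = (out, pvRun candles i.toNat) := by
  subst hs
  refine Prod.ext_iff.mpr ⟨?_, pv_streak_step candles i hi1 hn out⟩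
  unfold pvBStep
  simp only
  rw [if_neg (by intro hc; exact absurd hc.1 (by omega))]

-- the first two iterations (i = 1, 2) of B only build up the streak
lemma pv_prefix (candles : List (List (String × Int))) (h : 4 ≤ candles.length) (out : List (Option String)) :
    (PySem.List.pyRange 1 candles.length 1).foldl (pvBStep candles) (out, 0)
    = (PySem.List.pyRange 3 candles.length 1).foldl (pvBStep candles) (out, pvRun candles 2) := by
  have h1 : (1 : Int) < candles.length := by exact_mod_cast (by omega : 1 < candles.length)
  have h2 : (2 : Int) < candles.length := by exact_mod_cast (by omega : 2 < candles.length)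
  rw [PySem.List.pyRange_one_cons h1, show (1:Int) + 1 = 2 from rfl,
      PySem.List.pyRange_one_cons h2, show (2:Int) + 1 = 3 from rfl]
  simp only [List.foldl_cons]
  rw [pv_small_step candles 1 (by omega) (by omega) h1 out 0 (by simp [pvRun]),
      pv_small_step candles 2 (by omega) (by omega) h2 out (pvRun candles ((1:Int).toNat))
        (by norm_num)]
  rfl

-- ===== VERDICT (by name: the statement is the Claim_ definition above) =====
theorem signals_double_inside_bar_spec : Claim_equal_signals_double_inside_bar := by
  intro candles _ _
  unfold Spec_signals_double_inside_bar signals_double_inside_bar signals_double_inside_bar_alt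
  by_cases h : candles.length < 4
  · rw [if_pos h, PySem.List.pyRange_one_eq_nil (by exact_mod_cast (by omega : candles.length ≤ 3))]
    simp
  · rw [if_neg h]
    rw [pv_prefix candles (by omega) (List.replicate candles.length none)]
    have := pv_fold candles (candles.length - 3) 3 (by omega)
      (by omega) (List.replicate candles.length none)
    rw [show ((3:Int) - 1).toNat = 2 from rfl] at this
    exact this.symm
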